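-- pv_equiv track=rewrite | github.com/alphal00p/alphaloop | TOPT_LTD/topt_ltd.py | is_a_cFF
-- ===== SOURCE A (Python) =====
-- import itertools
--
-- def is_a_cFF(family):
--
--     # First check that the intersection of any two subset of the family is either one of the subset or the empty set
--     for i, a in enumerate(family):
--         for b in family[i+1:]:
--             if a.intersection(b) not in [a,b,set([])]:
--                 return False
--
--     # Then check that no set can be written as the union of any number of other sets.
--     all_possible_unions = []
--     for n_subsets in range(2,len(family)):
--         for comb in itertools.combinations(family,n_subsets):
--             if set().union(*comb) not in comb:
--                 all_possible_unions.append(set().union(*comb))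
--
--     for f in family:
--         if f in all_possible_unions:
--             return False
--
--     return True
-- ===== SOURCE B (Python) =====
-- def is_a_cFF(family):
--     fam = list(family)
--
--     # Pairwise: the intersection of any two members must be one of them or empty,
--     # i.e. one contains the other or they are disjoint.
--     for i, a in enumerate(fam):
--         for b in fam[i+1:]:
--             if not (a <= b or b <= a or a.isdisjoint(b)):
--                 return False
--
--     # A nonempty set f is a union of >=2 other family members (none equal to f)
--     # iff it equals the union of all its proper subsets in the family.
--     for f in fam:
--         if f and f == set().union(*(g for g in fam if g < f)):
--             return False
--
--     return True
-- ===== Notes on version B (the rewrite author's own statement) =====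
-- stated objective: faster
-- what changed: Instead of enumerating all 2^n combinations of family members and collecting their unions, B tests, for each set f, whether f equals the union of its proper subsets within the family (a set is a union of other members iff it is the union of all its proper subsets in the family); the pairwise intersection check is kept.
import Mathlib
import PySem

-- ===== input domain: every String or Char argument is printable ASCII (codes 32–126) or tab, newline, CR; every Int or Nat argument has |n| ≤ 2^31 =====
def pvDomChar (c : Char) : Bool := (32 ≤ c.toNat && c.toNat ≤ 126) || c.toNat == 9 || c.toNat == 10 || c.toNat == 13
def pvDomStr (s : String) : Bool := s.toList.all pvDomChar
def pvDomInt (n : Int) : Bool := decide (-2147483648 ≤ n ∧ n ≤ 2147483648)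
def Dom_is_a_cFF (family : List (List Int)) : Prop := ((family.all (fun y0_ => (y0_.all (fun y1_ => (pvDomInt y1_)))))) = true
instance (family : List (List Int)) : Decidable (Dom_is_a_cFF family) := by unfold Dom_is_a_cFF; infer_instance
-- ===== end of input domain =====

-- B replaces A's exponential enumeration of all member combinations by a per-set test
-- against the union of its proper subsets in the family (objective: faster, asymptotically).


-- ===== PORT A =====
-- set().union(*comb): fold Python set-union over a list of sets
def unionAll (comb : List (List Int)) : List Int :=
  comb.foldl (fun acc s => PySem.Set.union acc s) PySem.Set.empty

-- 'a.intersection(b) not in [a, b, set([])]' (list membership = set equality against each entry)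
def pairCondA (a b : List Int) : Bool :=
  PySem.Set.equal (PySem.Set.inter a b) a || PySem.Set.equal (PySem.Set.inter a b) b ||
    PySem.Set.equal (PySem.Set.inter a b) PySem.Set.empty

-- 'for i, a in enumerate(family): for b in family[i+1:]: …' with the early return False
def pairLoopA : List (List Int) → Bool
  | [] => true
  | a :: rest => (rest.all (fun b => pairCondA a b)) && pairLoopA rest

-- the all_possible_unions list: 'for n_subsets in range(2, len(family)): for comb in combinations(…)'
def allUnionsA (family : List (List Int)) : List (List Int) :=
  (PySem.List.pyRange 2 family.length 1).foldl (fun acc k =>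
    (PySem.List.combinations family k.toNat).foldl (fun acc2 comb =>
      acc2 ++ (if comb.any (fun c => PySem.Set.equal (unionAll comb) c) then []
               else [unionAll comb])) acc) []

def is_a_cFF (family : List (List Int)) : Bool :=
  if pairLoopA family then
    if family.any (fun f => (allUnionsA family).any (fun u => PySem.Set.equal f u)) then false
    else true
  else false

-- ===== PORT B =====
-- 'a <= b or b <= a or a.isdisjoint(b)'
def pairCondB (a b : List Int) : Bool :=
  PySem.Set.issubset a b || PySem.Set.issubset b a || PySem.Set.isdisjoint a b

def pairLoopB : List (List Int) → Bool
  | [] => true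
  | a :: rest => (rest.all (fun b => pairCondB a b)) && pairLoopB rest

-- 'set().union(*(g for g in fam if g < f))' (g < f: proper subset)
def properSubUnion (family : List (List Int)) (f : List Int) : List Int :=
  unionAll (family.filter (fun g => PySem.Set.issubset g f && !PySem.Set.issubset f g))

def is_a_cFF_alt (family : List (List Int)) : Bool :=
  pairLoopB family &&
    family.all (fun f => f.isEmpty || !PySem.Set.equal (properSubUnion family f) f)

-- ===== PRECONDITION & SPEC =====
def Spec_is_a_cFF (family : List (List Int)) (out : Bool) : Prop := out = is_a_cFF_alt family
instance (family : List (List Int)) (out : Bool) : Decidable (Spec_is_a_cFF family out) := by unfold Spec_is_a_cFF; infer_instance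

-- ===== CLAIM (what is proved, stated in full; the proofs are below) =====
def Claim_equal_is_a_cFF : Prop := ∀ (family : List (List Int)), Dom_is_a_cFF family → Spec_is_a_cFF family (is_a_cFF family)

-- ===== LEMMAS AND PROOFS =====

theorem issubset_iff (a b : List Int) : PySem.Set.issubset a b = true ↔ ∀ x ∈ a, x ∈ b := by
  simp [PySem.Set.issubset, PySem.Set.contains]

theorem equal_iff (a b : List Int) :
    PySem.Set.equal a b = true ↔ (∀ x ∈ a, x ∈ b) ∧ (∀ x ∈ b, x ∈ a) := by
  simp [PySem.Set.equal]

theorem equal_iff' (a b : List Int) :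
    PySem.Set.equal a b = true ↔ ∀ x, (x ∈ a ↔ x ∈ b) := by
  rw [equal_iff]
  constructor
  · rintro ⟨h1, h2⟩ x
    exact ⟨h1 x, h2 x⟩
  · intro h
    exact ⟨fun x hx => (h x).1 hx, fun x hx => (h x).2 hx⟩

theorem mem_unionAll_gen (comb : List (List Int)) (acc : List Int) (x : Int) :
    x ∈ comb.foldl (fun acc s => PySem.Set.union acc s) acc ↔ x ∈ acc ∨ ∃ s ∈ comb, x ∈ s := by
  induction comb generalizing acc with
  | nil => simp
  | cons s rest ih => simp [ih, PySem.Set.mem_union]; tauto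

theorem mem_unionAll (comb : List (List Int)) (x : Int) :
    x ∈ unionAll comb ↔ ∃ s ∈ comb, x ∈ s := by
  simp [unionAll, mem_unionAll_gen, PySem.Set.empty]

-- the two pairwise tests agree: a∩b ∈ {a, b, ∅} iff a ⊆ b, b ⊆ a, or a,b disjoint
theorem pairCond_eq (a b : List Int) : pairCondA a b = pairCondB a b := by
  rw [Bool.eq_iff_iff]
  simp [pairCondA, pairCondB, PySem.Set.equal, PySem.Set.inter, PySem.Set.issubset,
    PySem.Set.isdisjoint, PySem.Set.contains, PySem.Set.empty, List.mem_filter]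
  constructor
  · rintro ((⟨h1, h2⟩ | h) | h)
    · exact Or.inl (Or.inl fun x hx => (h2 x hx).2)
    · exact Or.inl (Or.inr fun x hx => (h x hx).1)
    · exact Or.inr h
  · rintro ((h | h) | h)
    · exact Or.inl (Or.inl ⟨fun x hx => Or.inr hx, fun x hx => ⟨hx, h x hx⟩⟩)
    · exact Or.inl (Or.inr fun x hx => ⟨h x hx, hx⟩)
    · exact Or.inr h

theorem pairLoop_eq (family : List (List Int)) : pairLoopA family = pairLoopB family := by
  induction family with
  | nil => rfl
  | cons a rest ih => simp [pairLoopA, pairLoopB, ih, pairCond_eq]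

-- membership in the all_possible_unions list, unfolded
theorem mem_allUnionsA (family : List (List Int)) (u : List Int) :
    u ∈ allUnionsA family ↔ ∃ k : Int, (2 ≤ k ∧ k < family.length) ∧
      ∃ comb, comb.Sublist family ∧ comb.length = k.toNat ∧
        (¬ ∃ c ∈ comb, PySem.Set.equal (unionAll comb) c = true) ∧ u = unionAll comb := by
  unfold allUnionsA
  simp only [PySem.List.foldl_append_eq_flatMap, List.nil_append]
  simp [List.mem_flatMap, PySem.List.mem_pyRange_one, PySem.List.mem_combinations_iff,
    List.mem_ite_nil_left, List.any_eq_true]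
  constructor
  · rintro ⟨k, hk, comb, ⟨hs, hl⟩, hne, hu⟩
    exact ⟨k, hk, comb, hs, hl, hne, hu⟩
  · rintro ⟨k, hk, comb, hs, hl, hne, hu⟩
    exact ⟨k, hk, comb, ⟨hs, hl⟩, hne, hu⟩

-- key fact: f matches some recorded union iff f is nonempty and equals the union of its
-- proper subsets within the family
theorem main_iff (family : List (List Int)) (f : List Int) (hf : f ∈ family) :
    (∃ u ∈ allUnionsA family, PySem.Set.equal f u = true) ↔
      (f ≠ [] ∧ PySem.Set.equal (properSubUnion family f) f = true) := by
  have memS : ∀ g, (g ∈ family.filter (fun g => PySem.Set.issubset g f && !PySem.Set.issubset f g)) ↔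
      (g ∈ family ∧ (∀ x ∈ g, x ∈ f) ∧ ∃ x ∈ f, x ∉ g) := by
    intro g
    simp [List.mem_filter, PySem.Set.issubset, PySem.Set.contains]
  constructor
  · rintro ⟨u, hu, hequ⟩
    rw [mem_allUnionsA] at hu
    obtain ⟨k, ⟨hk2, hkn⟩, comb, hsub, hlen, hnone, rfl⟩ := hu
    rw [equal_iff] at hequ
    obtain ⟨hfu, huf⟩ := hequ
    have hcne : comb ≠ [] := by
      intro h; subst h; simp at hlen; omega
    obtain ⟨c0, hc0⟩ := List.exists_mem_of_ne_nil comb hcne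
    have hfne : f ≠ [] := by
      intro h; subst h
      apply hnone
      refine ⟨c0, hc0, ?_⟩
      rw [equal_iff]
      refine ⟨fun x hx => absurd (huf x hx) (by simp), ?_⟩
      exact fun x hx => (mem_unionAll comb x).2 ⟨c0, hc0, hx⟩
    refine ⟨hfne, ?_⟩
    rw [equal_iff]
    constructor
    · intro x hx
      obtain ⟨g, hg, hxg⟩ := (mem_unionAll _ x).1 hx
      exact ((memS g).1 hg).2.1 x hxg
    · intro x hxf
      obtain ⟨c, hc, hxc⟩ := (mem_unionAll comb x).1 (hfu x hxf)
      refine (mem_unionAll _ x).2 ⟨c, ?_, hxc⟩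
      rw [memS]
      refine ⟨hsub.subset hc, fun y hy => huf y ((mem_unionAll comb y).2 ⟨c, hc, hy⟩), ?_⟩
      by_cases hfc : ∀ y ∈ f, y ∈ c
      · exfalso
        apply hnone
        refine ⟨c, hc, ?_⟩
        rw [equal_iff]
        exact ⟨fun y hy => hfc y (huf y hy), fun y hy => (mem_unionAll comb y).2 ⟨c, hc, hy⟩⟩
      · push Not at hfc
        exact hfc
  · rintro ⟨hfne, hequ⟩
    rw [equal_iff] at hequ
    obtain ⟨hSf, hfS⟩ := hequ
    have h2 : 2 ≤ (family.filter (fun g => PySem.Set.issubset g f && !PySem.Set.issubset f g)).length := by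
      rcases hS : family.filter (fun g => PySem.Set.issubset g f && !PySem.Set.issubset f g) with _ | ⟨g, rest⟩
      · exfalso
        obtain ⟨x, hx⟩ := List.exists_mem_of_ne_nil f hfne
        have := hfS x hx
        rw [properSubUnion, hS, mem_unionAll] at this
        simp at this
      · rcases rest with _ | ⟨g2, rest2⟩
        · exfalso
          have hgS : g ∈ family.filter (fun g => PySem.Set.issubset g f && !PySem.Set.issubset f g) := by
            rw [hS]; exact List.mem_singleton_self g
          have hfg : ∀ x ∈ f, x ∈ g := by
            intro x hx
            have := hfS x hx
            rw [properSubUnion, hS, mem_unionAll] at this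
            simpa using this
          obtain ⟨x, hx, hng⟩ := ((memS g).1 hgS).2.2
          exact hng (hfg x hx)
        · simp
    have hlt : (family.filter (fun g => PySem.Set.issubset g f && !PySem.Set.issubset f g)).length < family.length := by
      rw [List.length_filter_lt_length_iff_exists]
      refine ⟨f, hf, ?_⟩
      simp [issubset_iff]
    refine ⟨properSubUnion family f, ?_, ?_⟩
    · rw [mem_allUnionsA]
      refine ⟨((family.filter (fun g => PySem.Set.issubset g f && !PySem.Set.issubset f g)).length : Int),
        ⟨by exact_mod_cast h2, by exact_mod_cast hlt⟩,
        family.filter (fun g => PySem.Set.issubset g f && !PySem.Set.issubset f g),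
        List.filter_sublist, by simp, ?_, rfl⟩
      rintro ⟨c, hc, hce⟩
      rw [equal_iff] at hce
      have hfc : ∀ x ∈ f, x ∈ c := fun x hx => hce.1 x (by rw [properSubUnion] at hfS; exact hfS x hx)
      obtain ⟨x, hx, hng⟩ := ((memS c).1 hc).2.2
      exact hng (hfc x hx)
    · rw [equal_iff]
      exact ⟨fun x hx => hfS x hx, fun x hx => hSf x hx⟩

theorem any_eq_not_all (family : List (List Int)) :
    (family.any (fun f => (allUnionsA family).any (fun u => PySem.Set.equal f u))) =
      !(family.all (fun f => f.isEmpty || !PySem.Set.equal (properSubUnion family f) f)) := by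
  rw [Bool.eq_iff_iff]
  simp [List.any_eq_true]
  constructor
  · rintro ⟨f, hfm, u, hu, hiff⟩
    have h := (main_iff family f hfm).1 ⟨u, hu, (equal_iff' f u).2 hiff⟩
    exact ⟨f, hfm, h.1, (equal_iff' _ f).1 h.2⟩
  · rintro ⟨f, hfm, hne, hiff⟩
    obtain ⟨u, hu, he⟩ := (main_iff family f hfm).2 ⟨hne, (equal_iff' _ f).2 hiff⟩
    exact ⟨f, hfm, u, hu, (equal_iff' f u).1 he⟩

-- ===== VERDICT (by name: the statement is the Claim_ definition above) =====
theorem is_a_cFF_spec : Claim_equal_is_a_cFF := by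
  intro family _
  unfold Spec_is_a_cFF is_a_cFF is_a_cFF_alt
  rw [pairLoop_eq, any_eq_not_all]
  cases hp : pairLoopB family <;>
    cases ha : family.all (fun f => f.isEmpty || !PySem.Set.equal (properSubUnion family f) f) <;>
      simp [hp, ha]
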